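-- pv_equiv track=rewrite | github.com/FlugBobby/advent-of-code-2019 | day-4/main.py | get_highest_next
-- ===== SOURCE A (Python) =====
-- def get_highest_next(nbr):
--     highest = nbr[0]
--     for i in range(1,  len(nbr)):
--         if nbr[i] < highest:
--             for j in range(i,  len(nbr)):
--                 nbr[j] = highest
--             return (nbr)
--         else:
--             highest = nbr[i]
--     return nbr
-- ===== SOURCE B (Python) =====
-- def get_highest_next(nbr):
--     # pass 1: build the running-max (prefix maximum) table
--     pre = []
--     m = None
--     for x in nbr:
--         m = x if (m is None or x > m) else m
--         pre.append(m)
--     # pass 2: first index where the table disagrees with the list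
--     i = next((k for k in range(len(nbr)) if pre[k] != nbr[k]), None)
--     if i is not None:
--         nbr[i:] = [pre[i]] * (len(nbr) - i)
--     return nbr
-- ===== Notes on version B (the rewrite author's own statement) =====
-- stated objective: alternative
-- what changed: Replaces A's single scan with an early inner fill loop by a two-pass table decomposition: build the prefix-maximum table, find the first index where it disagrees with the list, and fill the tail with one slice assignment. (A raises IndexError on the empty list, which Pre_ excludes; B happens to return [] there.)
-- outside the precondition, e.g. on get_highest_next([]): A raises IndexError, B returns []
import Mathlib
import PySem

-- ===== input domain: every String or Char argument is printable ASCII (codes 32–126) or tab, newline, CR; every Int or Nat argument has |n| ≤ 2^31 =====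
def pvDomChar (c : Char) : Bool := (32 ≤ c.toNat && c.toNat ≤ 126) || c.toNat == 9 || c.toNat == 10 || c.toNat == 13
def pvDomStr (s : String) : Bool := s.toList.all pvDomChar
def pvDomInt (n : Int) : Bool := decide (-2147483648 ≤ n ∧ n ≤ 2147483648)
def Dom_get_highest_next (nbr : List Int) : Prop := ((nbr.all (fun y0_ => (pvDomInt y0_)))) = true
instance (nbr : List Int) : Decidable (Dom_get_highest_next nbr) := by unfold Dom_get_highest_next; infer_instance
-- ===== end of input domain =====

-- B rebuilds the result from a prefix-maximum table instead of A's scan-and-fill loop (objective: alternative).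
-- A mutates nbr in place; the equivalence here is about the RETURN value only.

-- ===== PORT A =====
-- A's loop over indices 1..len-1 keeping 'highest'; on the first drop it fills the rest with 'highest'.
def pvGoA (highest : Int) (rest : List Int) : List Int :=
  match rest with
  | [] => []
  | x :: xs => if x < highest then List.replicate (xs.length + 1) highest
               else x :: pvGoA x xs

def get_highest_next (nbr : List Int) : List Int :=
  match nbr with
  | [] => []            -- unreachable under Pre_: Python A raises IndexError on nbr[0]
  | h :: t => h :: pvGoA h t

-- ===== PORT B =====
-- pass 1 of Source B: the running-max table (m = None initially).
def pvPmax (m : Option Int) (xs : List Int) : List Int :=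
  match xs with
  | [] => []
  | x :: xs =>
    let m' : Int := match m with | none => x | some v => if x > v then x else v
    m' :: pvPmax (some m') xs

-- pass 2 of Source B: first index where pre and nbr disagree, paired with pre's value there.
def pvMismatch (pre nbr : List Int) : Option (Nat × Int) :=
  match pre, nbr with
  | p :: ps, x :: xs =>
    if p ≠ x then some (0, p)
    else (pvMismatch ps xs).map (fun kv => (kv.1 + 1, kv.2))
  | _, _ => none

def get_highest_next_alt (nbr : List Int) : List Int :=
  let pre := pvPmax none nbr
  match pvMismatch pre nbr with
  | none => nbr
  | some (i, p) => nbr.take i ++ List.replicate (nbr.length - i) p   -- nbr[i:] = [pre[i]]*(len-i)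

-- ===== PRECONDITION & SPEC =====
-- Pre_ excludes only the empty list, on which Python A raises IndexError.
def Pre_get_highest_next (nbr : List Int) : Prop := nbr ≠ []
instance (nbr : List Int) : Decidable (Pre_get_highest_next nbr) := by unfold Pre_get_highest_next; infer_instance
def pvWitness_get_highest_next : List Int := [1, 3, 2, 5]

def Spec_get_highest_next (nbr : List Int) (out : List Int) : Prop := out = get_highest_next_alt nbr
instance (nbr : List Int) (out : List Int) : Decidable (Spec_get_highest_next nbr out) := by unfold Spec_get_highest_next; infer_instance

-- ===== CLAIM (what is proved, stated in full; the proofs are below) =====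
def Claim_equal_get_highest_next : Prop := ∀ (nbr : List Int), Dom_get_highest_next nbr → Pre_get_highest_next nbr → Spec_get_highest_next nbr (get_highest_next nbr)

-- ===== LEMMAS AND PROOFS =====

-- Core invariant: A's loop with accumulator 'highest' computes the same list as B's
-- mismatch-then-fill applied to the running-max table seeded with 'highest'.
theorem pvGoA_eq (t : List Int) : ∀ (h : Int),
    pvGoA h t = (match pvMismatch (pvPmax (some h) t) t with
                 | none => t
                 | some (i, p) => t.take i ++ List.replicate (t.length - i) p) := by
  induction t with
  | nil => intro h; simp [pvGoA, pvPmax, pvMismatch]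
  | cons x xs ih =>
    intro h
    by_cases hx : x < h
    · simp only [pvGoA, pvPmax, pvMismatch, if_pos hx, if_neg (by omega : ¬ x > h)]
      rw [if_pos (by omega : h ≠ x)]
      simp
    · have hm : (if x > h then x else h) = x := by
        by_cases h2 : x > h <;> simp [h2] <;> omega
      simp only [pvGoA, pvPmax, pvMismatch, if_neg hx, hm]
      rw [if_neg (by simp : ¬ x ≠ x), ih x]
      cases hmm : pvMismatch (pvPmax (some x) xs) xs with
      | none => simp
      | some kv =>
        rcases kv with ⟨k, v⟩
        simp

theorem get_highest_next_eq (nbr : List Int) (hne : nbr ≠ []) :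
    get_highest_next nbr = get_highest_next_alt nbr := by
  cases nbr with
  | nil => exact absurd rfl hne
  | cons h t =>
    have hm : pvPmax none (h :: t) = h :: pvPmax (some h) t := by simp [pvPmax]
    simp only [get_highest_next, get_highest_next_alt, hm, pvMismatch]
    rw [if_neg (by simp : ¬ h ≠ h), pvGoA_eq t h]
    cases hmm : pvMismatch (pvPmax (some h) t) t with
    | none => simp
    | some kv =>
      rcases kv with ⟨k, v⟩
      simp

-- ===== VERDICT (by name: the statement is the Claim_ definition above) =====
theorem get_highest_next_spec : Claim_equal_get_highest_next := by
  intro nbr _ hpre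
  exact get_highest_next_eq nbr hpre
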